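-- pv_equiv track=rewrite | github.com/stkirk/cs-guided-project-array-string-manipulation | src/tasks/task6.py | alphaPlusOne
-- ===== SOURCE A (Python) =====
-- def alphaPlusOne(inputString):
--     # create new string to add on to
--     new_str = ""
--     # loop through inputString
--     for letter in inputString:
--         # if letter is z, add an a
--         if letter == "z":
--             new_str += "a"
--         # otherwise add character value of ord("letter") + 1
--         else:
--             new_str += chr(ord(letter) + 1)
--     return new_str
-- ===== SOURCE B (Python) =====
-- def alphaPlusOne(inputString):
--     # build a translation table once: each distinct char -> its successor ('z' -> 'a')
--     table = str.maketrans({c: "a" if c == "z" else chr(ord(c) + 1)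
--                            for c in dict.fromkeys(inputString)})
--     # apply it in a single table-driven pass
--     return inputString.translate(table)
-- ===== Notes on version B (the rewrite author's own statement) =====
-- stated objective: idiomatic
-- what changed: Replaces the explicit branching character loop with a translation table built once over the distinct characters and a single str.translate call.
import Mathlib
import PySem

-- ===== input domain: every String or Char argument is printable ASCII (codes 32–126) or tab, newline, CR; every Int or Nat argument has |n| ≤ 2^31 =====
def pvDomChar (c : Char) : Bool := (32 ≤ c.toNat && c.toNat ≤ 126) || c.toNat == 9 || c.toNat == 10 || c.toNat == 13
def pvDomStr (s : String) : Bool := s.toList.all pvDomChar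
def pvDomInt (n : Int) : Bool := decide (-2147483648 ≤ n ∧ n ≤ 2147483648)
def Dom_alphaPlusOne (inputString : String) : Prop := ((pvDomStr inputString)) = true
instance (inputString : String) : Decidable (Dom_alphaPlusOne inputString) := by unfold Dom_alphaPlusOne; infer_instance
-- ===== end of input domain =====

-- B replaces A's branching character loop by a translation table built once from the
-- distinct characters and applied in one table-driven pass (idiomatic re-implementation).


-- ===== PORT A =====
def alphaPlusOne (inputString : String) : String :=
  inputString.toList.foldl (fun new_str letter =>
    if letter == 'z' then new_str ++ "a"
    else new_str ++ String.singleton (Char.ofNat (letter.toNat + 1))) ""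

-- ===== PORT B =====
-- the table entry for one character ('a' if it is 'z', else its successor)
def pvShift (c : Char) : String :=
  if c == 'z' then "a" else String.singleton (Char.ofNat (c.toNat + 1))

def alphaPlusOne_alt (inputString : String) : String :=
  -- table = str.maketrans({c: … for c in dict.fromkeys(inputString)})
  let table : PySem.Dict Char String :=
    (PySem.List.dedup inputString.toList).foldl
      (fun d c => d.insert c (pvShift c)) PySem.Dict.empty
  -- inputString.translate(table): chars absent from the table pass through unchanged
  inputString.toList.foldl (fun acc c => acc ++ ((table.get? c).getD (String.singleton c))) ""

-- ===== PRECONDITION & SPEC =====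
def Spec_alphaPlusOne (inputString : String) (out : String) : Prop := out = alphaPlusOne_alt inputString
instance (inputString : String) (out : String) : Decidable (Spec_alphaPlusOne inputString out) := by unfold Spec_alphaPlusOne; infer_instance

-- ===== CLAIM (what is proved, stated in full; the proofs are below) =====
def Claim_equal_alphaPlusOne : Prop := ∀ (inputString : String), Dom_alphaPlusOne inputString → Spec_alphaPlusOne inputString (alphaPlusOne inputString)

-- ===== LEMMAS AND PROOFS =====
theorem pv_table_get (l : List Char) (d : PySem.Dict Char String) (c : Char) :
    (l.foldl (fun d c => d.insert c (pvShift c)) d).get? c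
      = if c ∈ l then some (pvShift c) else d.get? c := by
  induction l generalizing d with
  | nil => simp
  | cons a l ih =>
    simp only [List.foldl_cons, ih, PySem.Dict.get?_insert, List.mem_cons]
    by_cases hl : c ∈ l <;> by_cases ha : c = a <;> simp [hl, ha]

theorem alphaPlusOne_spec : Claim_equal_alphaPlusOne := by
  intro s _
  unfold Spec_alphaPlusOne alphaPlusOne alphaPlusOne_alt
  symm
  apply PySem.List.foldl_congr_mem
  intro acc c hc

  rw [pv_table_get, if_pos ((PySem.List.mem_dedup _ _).mpr hc)]
  by_cases h : c = 'z' <;> simp [pvShift, h]
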